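-- pv_equiv track=rewrite | github.com/aye-am-rt/python-practice | Strings/KUniquesIntSubs/CountUnqSubSeqLnK.py | solution
-- ===== SOURCE A (Python) =====
-- def solution(A, k):
--     # size of the vector which does is constant
--     N = len(A)
--
--     # bases cases
--     if N < k or N < 1 or k < 1:
--         return 0
--     if N == k:
--         return 1
--
--     # Prepare arrays for recursion
--     v1 = [0] * N
--     v2 = [0] * N
--     v3 = [0] * N
--
--     # initiate separately for k = 1  initiate the last element
--     v2[N - 1] = 1
--     v3[ A[N - 1] - 1 ] = 1
--
--     # initiate all other elements of k = 1
--     for i in range(N - 2, -1, -1):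
--
--         # initialize the front element
--         # to vector v2
--         v2[i] = v2[i + 1]
--
--         # if element v[a[i]-1] is 0
--         # then increment it in vector v2
--         if v3[A[i] - 1] == 0:
--             v2[i] += 1
--             v3[A[i] - 1] = 1
--
--     # iterate for all possible values of K
--     for j in range(1, k):
--
--         # fill the vectors with 0
--         v3 = [0] * N
--
--         # fill(v1.begin(), v1.end(), 0) the last must be 0 as from last no unique  subarray can be formed
--         v1[N - 1] = 0
--
--         # Iterate for all index from which unique
--         # subsequences can be formed
--         for i in range(N - 2, -1, -1):
--             # add the number of subsequence formed
--             # from the next index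
--             v1[i] = v1[i + 1]
--
--             # start with combinations on the
--             # next index
--             v1[i] = v1[i] + v2[i + 1]
--
--             # Remove the elements which have
--             # already been counted
--             v1[i] = v1[i] - v3[A[i] - 1]
--
--             # Update the number used
--             v3[A[i] - 1] = v2[i + 1]
--
--         # prepare the next iteration
--         # by filling v2 in v1
--         for i in range(len(v1)):
--             v2[i] = v1[i]
--
--         # last answer is stored in v2
--     return v2[0]
-- ===== SOURCE B (Python) =====
-- def solution(A, k):
--     N = len(A)
--
--     # base cases
--     if N < k or N < 1 or k < 1:
--         return 0
--     if N == k: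
--         return 1
--
--     # single right-to-left pass: dp[j] = number of distinct length-j
--     # key-subsequences of the suffix seen so far; last[key][j-1] remembers
--     # the dp[j-1] contribution stored at the nearest occurrence of the key.
--     dp = [1] + [0] * k
--     last = [[0] * k for _ in range(N)]
--     for x in reversed(A):
--         row = last[x - 1]
--         for j in range(k, 0, -1):
--             prev = dp[j - 1]
--             dp[j] += prev - row[j - 1]
--             row[j - 1] = prev
--     return dp[k]
-- ===== Notes on version B (the rewrite author's own statement) =====
-- stated objective: simpler
-- what changed: A runs k-1 layer passes, each rebuilding three length-N vectors (refill, inner scan, copy-back); B makes a single right-to-left pass keeping a (k+1)-entry dp vector and a per-key row of stored contributions, with no per-layer refill or copy loops.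
import Mathlib
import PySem

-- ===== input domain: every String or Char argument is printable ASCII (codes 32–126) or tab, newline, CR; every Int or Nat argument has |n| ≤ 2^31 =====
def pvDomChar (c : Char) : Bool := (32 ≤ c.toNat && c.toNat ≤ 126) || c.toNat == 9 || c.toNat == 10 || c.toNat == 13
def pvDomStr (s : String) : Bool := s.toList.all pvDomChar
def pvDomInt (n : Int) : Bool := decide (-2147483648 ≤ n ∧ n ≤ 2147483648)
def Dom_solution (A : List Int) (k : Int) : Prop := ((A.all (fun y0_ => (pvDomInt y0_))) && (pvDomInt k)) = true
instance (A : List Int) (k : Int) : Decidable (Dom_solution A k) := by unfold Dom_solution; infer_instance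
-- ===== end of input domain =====

-- B replaces A's layer-by-layer backward DP over three length-N vectors by a single
-- right-to-left pass keeping a (k+1)-vector dp and a per-key row of stored contributions
-- (objective: simpler — one pass, no per-layer refill/copy loops).

-- ===== PORT A =====
def aStep1 (A : List Int) (s : List Int × List Int) (i : Int) : List Int × List Int :=
  -- v2[i] = v2[i+1]; if v3[A[i]-1] == 0: v2[i] += 1; v3[A[i]-1] = 1
  let v2 := PySem.List.pySetD s.1 i (PySem.List.pyGetD s.1 (i+1) 0)
  if PySem.List.pyGetD s.2 (PySem.List.pyGetD A i 0 - 1) 0 = 0 then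
    (PySem.List.pySetD v2 i (PySem.List.pyGetD v2 i 0 + 1),
     PySem.List.pySetD s.2 (PySem.List.pyGetD A i 0 - 1) 1)
  else (v2, s.2)

def aStep2 (A : List Int) (v2 : List Int) (t : List Int × List Int) (i : Int) : List Int × List Int :=
  -- v1[i] = v1[i+1]; v1[i] += v2[i+1]; v1[i] -= v3[A[i]-1]; v3[A[i]-1] = v2[i+1]
  let v1 := PySem.List.pySetD t.1 i (PySem.List.pyGetD t.1 (i+1) 0)
  let v1 := PySem.List.pySetD v1 i (PySem.List.pyGetD v1 i 0 + PySem.List.pyGetD v2 (i+1) 0)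
  let v1 := PySem.List.pySetD v1 i (PySem.List.pyGetD v1 i 0 - PySem.List.pyGetD t.2 (PySem.List.pyGetD A i 0 - 1) 0)
  let v3 := PySem.List.pySetD t.2 (PySem.List.pyGetD A i 0 - 1) (PySem.List.pyGetD v2 (i+1) 0)
  (v1, v3)

def aLayer (A : List Int) (n : Nat) (N : Int) (s : List Int × List Int) (_j : Int) : List Int × List Int :=
  -- v3 = [0]*N; v1[N-1] = 0; inner loop; then v2[i] = v1[i] for all i
  let v3 : List Int := List.replicate n (0:Int)
  let v1 := PySem.List.pySetD s.1 (N-1) 0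
  let t := (PySem.List.pyRange (N-2) (-1) (-1)).foldl (aStep2 A s.2) (v1, v3)
  let v2 := (PySem.List.pyRange 0 (PySem.List.len t.1) 1).foldl
      (fun v2 i => PySem.List.pySetD v2 i (PySem.List.pyGetD t.1 i 0)) s.2
  (t.1, v2)

def solution (A : List Int) (k : Int) : Int :=
  let N : Int := PySem.List.len A
  if N < k ∨ N < 1 ∨ k < 1 then 0
  else if N = k then 1
  else
    let n := A.length
    let v1 : List Int := List.replicate n 0
    let v2 := PySem.List.pySetD (List.replicate n (0:Int)) (N-1) 1
    let v3 := PySem.List.pySetD (List.replicate n (0:Int)) (PySem.List.pyGetD A (N-1) 0 - 1) 1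
    let s := (PySem.List.pyRange (N-2) (-1) (-1)).foldl (aStep1 A) (v2, v3)
    let t := (PySem.List.pyRange 1 k 1).foldl (aLayer A n N) (v1, s.1)
    PySem.List.pyGetD t.2 0 0

-- ===== PORT B =====
def bInner (t : List Int × List Int) (j : Int) : List Int × List Int :=
  -- prev = dp[j-1]; dp[j] += prev - row[j-1]; row[j-1] = prev
  let prev := PySem.List.pyGetD t.1 (j-1) 0
  let dp := PySem.List.pySetD t.1 j (PySem.List.pyGetD t.1 j 0 + prev - PySem.List.pyGetD t.2 (j-1) 0)
  let row := PySem.List.pySetD t.2 (j-1) prev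
  (dp, row)

def bStep (k : Int) (s : List Int × List (List Int)) (x : Int) : List Int × List (List Int) :=
  -- row = last[x-1]; for j in range(k, 0, -1): …; (row written back: it is mutated in place)
  let row := PySem.List.pyGetD s.2 (x - 1) []
  let t := (PySem.List.pyRange k 0 (-1)).foldl bInner (s.1, row)
  (t.1, PySem.List.pySetD s.2 (x - 1) t.2)

def solution_alt (A : List Int) (k : Int) : Int :=
  let N : Int := PySem.List.len A
  if N < k ∨ N < 1 ∨ k < 1 then 0
  else if N = k then 1
  else
    let dp : List Int := 1 :: List.replicate k.toNat 0
    let last : List (List Int) := List.replicate A.length (List.replicate k.toNat 0)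
    let s := A.reverse.foldl (bStep k) (dp, last)
    PySem.List.pyGetD s.1 k 0

-- ===== PRECONDITION & SPEC =====
-- Pre_ excludes exactly the inputs on which the Python A raises IndexError: those that
-- reach the DP (1 ≤ k < len(A)) while some element x has x-1 outside [-len(A), len(A)-1]
-- as an index into a length-len(A) list (B raises on exactly the same inputs).
def Pre_solution (A : List Int) (k : Int) : Prop :=
  k < 1 ∨ (A.length : Int) ≤ k ∨ ∀ x ∈ A, 1 - (A.length : Int) ≤ x ∧ x ≤ (A.length : Int)
instance (A : List Int) (k : Int) : Decidable (Pre_solution A k) := by unfold Pre_solution; infer_instance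
def pvWitness_solution : List Int × Int := ([1, 2, 1, 3], 2)
def Spec_solution (A : List Int) (k : Int) (out : Int) : Prop := out = solution_alt A k
instance (A : List Int) (k : Int) (out : Int) : Decidable (Spec_solution A k out) := by unfold Spec_solution; infer_instance

-- ===== CLAIM (what is proved, stated in full; the proofs are below) =====
def Claim_equal_solution : Prop := ∀ (A : List Int) (k : Int), Dom_solution A k → Pre_solution A k → Spec_solution A k (solution A k)

-- ===== LEMMAS AND PROOFS =====

-- Normalised (wrapped) Python index, and exact forms of pyGetD/pySetD on in-range indices.
def normI (n : Nat) (i : Int) : Nat := if 0 ≤ i then i.toNat else n - (-i).toNat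

lemma pyIdx?_inrange (n : Nat) (i : Int) (h1 : -(n:Int) ≤ i) (h2 : i < n) :
    PySem.List.pyIdx? n i = some (normI n i) := by
  simp [PySem.List.pyIdx?, normI]; split_ifs <;> simp_all

lemma normI_lt (n : Nat) (i : Int) (h1 : -(n:Int) ≤ i) (h2 : i < n) : normI n i < n := by
  unfold normI; split_ifs <;> omega

lemma pyGetD_inrange {α : Type} (xs : List α) (i : Int) (d : α)
    (h1 : -(xs.length:Int) ≤ i) (h2 : i < xs.length) :
    PySem.List.pyGetD xs i d = xs.getD (normI xs.length i) d := by
  simp [PySem.List.pyGetD, PySem.List.pyGet?, pyIdx?_inrange _ _ h1 h2, List.getD]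

lemma pySetD_inrange {α : Type} (xs : List α) (i : Int) (v : α)
    (h1 : -(xs.length:Int) ≤ i) (h2 : i < xs.length) :
    PySem.List.pySetD xs i v = xs.set (normI xs.length i) v := by
  simp [PySem.List.pySetD, PySem.List.pySet?, pyIdx?_inrange _ _ h1 h2]

lemma getD_set_eq {α : Type} (xs : List α) (m : Nat) (v d : α) (h : m < xs.length) :
    (xs.set m v).getD m d = v := by simp [List.getD, h]

lemma getD_set_ne {α : Type} (xs : List α) (p m : Nat) (v d : α) (h : p ≠ m) :
    (xs.set p v).getD m d = xs.getD m d := by simp [List.getD, h]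

-- element at position m, its key (wrapped index A[m]-1), first occurrence of a key in [i, b)
def aGet (A : List Int) (m : Nat) : Int := A.getD m 0
def keyOf (A : List Int) (m : Nat) : Nat := normI A.length (aGet A m - 1)

def occ (A : List Int) (b p : Nat) : Nat → Option Nat := fun i =>
  if i < b then (if keyOf A i = p then some i else occ A b p (i+1)) else none
termination_by i => b - i

-- the mathematical table: T j i = number the DP computes for layer j at position i
def T (A : List Int) : Nat → Nat → Int
  | 0, _ => 1
  | j+1, i =>
    if i < A.length then
      T A (j+1) (i+1) + T A j (i+1) -
        (match occ A A.length (keyOf A i) (i+1) with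
          | some m => T A j (m+1)
          | none => 0)
    else 0
termination_by j i => (j, A.length - i)
decreasing_by
  · exact Prod.Lex.right _ (by omega)
  · exact Prod.Lex.left _ _ (by omega)
  · exact Prod.Lex.left _ _ (by omega)

-- range hypothesis extracted from Pre_ in the DP branch
def InRangeAll (A : List Int) : Prop :=
  ∀ x ∈ A, 1 - (A.length : Int) ≤ x ∧ x ≤ (A.length : Int)

lemma keyOf_lt (A : List Int) (hA : InRangeAll A) (m : Nat) (hm : m < A.length) :
    keyOf A m < A.length := by
  have hmem : aGet A m ∈ A := by
    unfold aGet; rw [List.getD_eq_getElem _ _ hm]; exact List.getElem_mem hm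
  have := hA _ hmem
  exact normI_lt _ _ (by omega) (by omega)

lemma T_zero (A : List Int) (i : Nat) : T A 0 i = 1 := by simp [T]

lemma T_top (A : List Int) (j : Nat) (hj : 1 ≤ j) (i : Nat) (hi : A.length ≤ i) : T A j i = 0 := by
  obtain ⟨j', rfl⟩ : ∃ j', j = j' + 1 := ⟨j - 1, by omega⟩
  rw [T]; simp [Nat.not_lt.mpr hi]

lemma T_rec (A : List Int) (j i : Nat) (hi : i < A.length) :
    T A (j+1) i = T A (j+1) (i+1) + T A j (i+1) -
      (match occ A A.length (keyOf A i) (i+1) with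
        | some m => T A j (m+1)
        | none => 0) := by
  rw [T]; simp [hi]

lemma occ_of_lt (A : List Int) (b p i : Nat) (h : i < b) :
    occ A b p i = if keyOf A i = p then some i else occ A b p (i+1) := by
  rw [occ]; simp [h]

lemma occ_of_ge (A : List Int) (b p i : Nat) (h : b ≤ i) : occ A b p i = none := by
  rw [occ]; simp [Nat.not_lt.mpr h]

lemma occ_some (A : List Int) (b p i m : Nat) (h : occ A b p i = some m) :
    i ≤ m ∧ m < b ∧ keyOf A m = p := by
  by_cases hib : i < b
  · rw [occ_of_lt _ _ _ _ hib] at h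
    split_ifs at h with hk
    · cases h; exact ⟨le_refl _, hib, hk⟩
    · have := occ_some A b p (i+1) m h
      exact ⟨by omega, this.2.1, this.2.2⟩
  · rw [occ_of_ge _ _ _ _ (by omega)] at h; cases h
termination_by b - i

lemma occ_mono (A : List Int) (b p i m : Nat) (hb : b ≤ A.length)
    (h : occ A b p i = some m) : occ A A.length p i = some m := by
  by_cases hib : i < b
  · rw [occ_of_lt _ _ _ _ hib] at h
    rw [occ_of_lt _ _ _ _ (by omega)]
    split_ifs at h with hk <;> simp [hk] at *
    · exact h
    · exact occ_mono A b p (i+1) m hb h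
  · rw [occ_of_ge _ _ _ _ (by omega)] at h; cases h
termination_by b - i

lemma occ_pred_none (A : List Int) (p i : Nat) (hn : 1 ≤ A.length)
    (h : occ A (A.length - 1) p i = none) :
    occ A A.length p i = none ∨ occ A A.length p i = some (A.length - 1) := by
  by_cases hib : i < A.length - 1
  · rw [occ_of_lt _ _ _ _ hib] at h
    rw [occ_of_lt _ _ _ _ (by omega)]
    split_ifs at h with hk <;> simp [hk] at *
    exact occ_pred_none A p (i+1) hn h
  · by_cases hi : i < A.length
    · have hieq : i = A.length - 1 := by omega
      rw [occ_of_lt _ _ _ _ hi]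
      split_ifs with hk
      · right; rw [hieq]
      · left; exact occ_of_ge _ _ _ _ (by omega)
    · left; exact occ_of_ge _ _ _ _ (by omega)
termination_by A.length - 1 - i

-- the subtraction term read from the (n-1)-bounded table equals the full one, for layers ≥ 1
lemma sub_fix (A : List Int) (j : Nat) (hj : 1 ≤ j) (p i : Nat) (hn : 1 ≤ A.length) :
    (match occ A (A.length - 1) p i with | some m => T A j (m+1) | none => 0) =
    (match occ A A.length p i with | some m => T A j (m+1) | none => 0) := by
  cases h : occ A (A.length - 1) p i with
  | some m => rw [occ_mono A _ p i m (by omega) h]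
  | none =>
    rcases occ_pred_none A p i hn h with h2 | h2
    · rw [h2]
    · rw [h2]
      show (0:Int) = T A j (A.length - 1 + 1)
      have hl : A.length - 1 + 1 = A.length := by omega
      rw [hl, T_top A j hj _ (le_refl _)]

-- ## A-side invariants
def Inv1 (A : List Int) (i : Nat) (s : List Int × List Int) : Prop :=
  s.1.length = A.length ∧ s.2.length = A.length ∧
  (∀ m, i ≤ m → m < A.length → s.1.getD m 0 = T A 1 m) ∧
  (∀ p, p < A.length → s.2.getD p 0 = match occ A A.length p i with | some _ => 1 | none => 0)

def Inv2 (A : List Int) (j : Nat) (i : Nat) (t : List Int × List Int) : Prop :=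
  t.1.length = A.length ∧ t.2.length = A.length ∧
  (∀ m, i ≤ m → m < A.length → t.1.getD m 0 = T A (j+1) m) ∧
  (∀ p, p < A.length →
    t.2.getD p 0 = match occ A (A.length - 1) p i with | some m => T A j (m+1) | none => 0)

lemma step1_spec (A : List Int) (hA : InRangeAll A) (i : Nat) (hi : i + 1 < A.length)
    (s : List Int × List Int) (h : Inv1 A (i+1) s) : Inv1 A i (aStep1 A s (i : Int)) := by
  obtain ⟨hl1, hl2, hv1, hv3⟩ := h
  have hmem : aGet A i ∈ A := by
    unfold aGet; rw [List.getD_eq_getElem _ _ (by omega)]; exact List.getElem_mem (by omega)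
  have hside := hA _ hmem
  have hkey : keyOf A i < A.length := keyOf_lt A hA i (by omega)
  have hgA : PySem.List.pyGetD A (i : Int) 0 = aGet A i := by
    simp [aGet]
  have hcast : ((i:Int)+1) = ((i+1:Nat):Int) := by push_cast; ring
  have e1 : PySem.List.pyGetD s.1 ((i:Int)+1) 0 = s.1.getD (i+1) 0 := by
    rw [hcast, PySem.List.pyGetD_natCast]
  have ekey : normI s.2.length (aGet A i - 1) = keyOf A i := by rw [hl2]; rfl
  have e3 : PySem.List.pyGetD s.2 (aGet A i - 1) 0 = s.2.getD (keyOf A i) 0 := by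
    rw [pyGetD_inrange _ _ _ (by rw [hl2]; omega) (by rw [hl2]; omega), ekey]
  have e4 : PySem.List.pySetD s.2 (aGet A i - 1) 1 = s.2.set (keyOf A i) 1 := by
    rw [pySetD_inrange _ _ _ (by rw [hl2]; omega) (by rw [hl2]; omega), ekey]
  unfold aStep1
  simp only [hgA, e1, e3, e4, PySem.List.pySetD_natCast, PySem.List.pyGetD_natCast]
  split_ifs with hc
  · -- key unseen in [i+1, n): occ = none
    have hocc : occ A A.length (keyOf A i) (i+1) = none := by
      rcases ho : occ A A.length (keyOf A i) (i+1) with _ | m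
      · rfl
      · rw [hv3 _ hkey, ho] at hc; norm_num at hc
    have hT1 : T A 1 i = T A 1 (i+1) + 1 := by
      have hr := T_rec A 0 i (by omega)
      rw [hocc] at hr
      simpa [T_zero] using hr
    refine ⟨by simp [hl1], by simp [hl2], ?_, ?_⟩
    · intro m him hmn
      rcases Nat.eq_or_lt_of_le him with rfl | hlt
      · rw [getD_set_eq _ _ _ _ (by rw [List.length_set, hl1]; omega),
            getD_set_eq _ _ _ _ (by rw [hl1]; omega),
            hv1 (i+1) (le_refl _) (by omega), hT1]
      · rw [getD_set_ne _ _ _ _ _ (by omega), getD_set_ne _ _ _ _ _ (by omega)]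
        exact hv1 m (by omega) hmn
    · intro p hp
      by_cases hpk : keyOf A i = p
      · subst hpk
        rw [getD_set_eq _ _ _ _ (by rw [hl2]; omega),
            occ_of_lt _ _ _ _ (by omega), if_pos rfl]
      · rw [getD_set_ne _ _ _ _ _ hpk, hv3 p hp,
            occ_of_lt A _ p i (by omega), if_neg hpk]
  · have hocc : ∃ m0, occ A A.length (keyOf A i) (i+1) = some m0 := by
      rcases ho : occ A A.length (keyOf A i) (i+1) with _ | m
      · rw [hv3 _ hkey, ho] at hc; norm_num at hc
      · exact ⟨m, rfl⟩
    obtain ⟨m0, hocc⟩ := hocc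
    have hT1 : T A 1 i = T A 1 (i+1) := by
      have hr := T_rec A 0 i (by omega)
      rw [hocc] at hr
      simp [T_zero] at hr
      omega
    refine ⟨by simp [hl1], hl2, ?_, ?_⟩
    · intro m him hmn
      rcases Nat.eq_or_lt_of_le him with rfl | hlt
      · rw [getD_set_eq _ _ _ _ (by rw [hl1]; omega),
            hv1 (i+1) (le_refl _) (by omega), hT1]
      · rw [getD_set_ne _ _ _ _ _ (by omega)]
        exact hv1 m (by omega) hmn
    · intro p hp
      by_cases hpk : keyOf A i = p
      · subst hpk
        rw [hv3 _ hp, hocc, occ_of_lt _ _ _ _ (by omega), if_pos rfl]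
      · rw [hv3 p hp, occ_of_lt A _ p i (by omega), if_neg hpk]

lemma loop1_spec (A : List Int) (hA : InRangeAll A) (i : Nat) (hi : i + 1 < A.length)
    (s : List Int × List Int) (h : Inv1 A (i+1) s) :
    Inv1 A 0 ((PySem.List.pyRange (i : Int) (-1) (-1)).foldl (aStep1 A) s) := by
  induction i generalizing s with
  | zero =>
    rw [PySem.List.pyRange_neg_one_cons (by omega),
        PySem.List.pyRange_neg_one_eq_nil (by norm_num)]
    simpa using step1_spec A hA 0 hi s h
  | succ i ih =>
    rw [PySem.List.pyRange_neg_one_cons (by omega)]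
    have h1 : ((i+1 : Nat) : Int) - 1 = (i : Int) := by push_cast; ring
    rw [List.foldl_cons, h1]
    exact ih (by omega) _ (step1_spec A hA (i+1) hi s h)

lemma step2_spec (A : List Int) (hA : InRangeAll A) (j : Nat) (hj : 1 ≤ j)
    (v2 : List Int) (hv2len : v2.length = A.length)
    (hv2 : ∀ m, m < A.length → v2.getD m 0 = T A j m)
    (i : Nat) (hi : i + 1 < A.length)
    (t : List Int × List Int) (h : Inv2 A j (i+1) t) :
    Inv2 A j i (aStep2 A v2 t (i : Int)) := by
  obtain ⟨hl1, hl2, hv1, hv3⟩ := h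
  have hmem : aGet A i ∈ A := by
    unfold aGet; rw [List.getD_eq_getElem _ _ (by omega)]; exact List.getElem_mem (by omega)
  have hside := hA _ hmem
  have hkey : keyOf A i < A.length := keyOf_lt A hA i (by omega)
  have hgA : PySem.List.pyGetD A (i : Int) 0 = aGet A i := by simp [aGet]
  have hcast : ((i:Int)+1) = ((i+1:Nat):Int) := by push_cast; ring
  have e1 : PySem.List.pyGetD t.1 ((i:Int)+1) 0 = t.1.getD (i+1) 0 := by
    rw [hcast, PySem.List.pyGetD_natCast]
  have e2 : PySem.List.pyGetD v2 ((i:Int)+1) 0 = v2.getD (i+1) 0 := by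
    rw [hcast, PySem.List.pyGetD_natCast]
  have ekey : normI t.2.length (aGet A i - 1) = keyOf A i := by rw [hl2]; rfl
  have e3 : PySem.List.pyGetD t.2 (aGet A i - 1) 0 = t.2.getD (keyOf A i) 0 := by
    rw [pyGetD_inrange _ _ _ (by rw [hl2]; omega) (by rw [hl2]; omega), ekey]
  have e4 : PySem.List.pySetD t.2 (aGet A i - 1) (v2.getD (i+1) 0) = t.2.set (keyOf A i) (v2.getD (i+1) 0) := by
    rw [pySetD_inrange _ _ _ (by rw [hl2]; omega) (by rw [hl2]; omega), ekey]
  unfold aStep2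
  simp only [hgA, e1, e2, e3, PySem.List.pySetD_natCast, PySem.List.pyGetD_natCast, e4]
  refine ⟨by simp [hl1], by simp [hl2], ?_, ?_⟩
  · intro m him hmn
    rcases Nat.eq_or_lt_of_le him with rfl | hlt
    · rw [getD_set_eq _ _ _ _ (by rw [List.length_set, List.length_set, hl1]; omega),
          getD_set_eq _ _ _ _ (by rw [List.length_set, hl1]; omega),
          getD_set_eq _ _ _ _ (by rw [hl1]; omega),
          hv1 (i+1) (le_refl _) (by omega), hv2 (i+1) (by omega), hv3 _ hkey,
          sub_fix A j hj (keyOf A i) (i+1) (by omega)]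
      exact (T_rec A j i (by omega)).symm
    · rw [getD_set_ne _ _ _ _ _ (by omega), getD_set_ne _ _ _ _ _ (by omega),
          getD_set_ne _ _ _ _ _ (by omega)]
      exact hv1 m (by omega) hmn
  · intro p hp
    by_cases hpk : keyOf A i = p
    · subst hpk
      rw [getD_set_eq _ _ _ _ (by rw [hl2]; omega),
          occ_of_lt _ _ _ _ (by omega), if_pos rfl, hv2 (i+1) (by omega)]
    · rw [getD_set_ne _ _ _ _ _ hpk, hv3 p hp,
          occ_of_lt A _ p i (by omega), if_neg hpk]

lemma loop2_spec (A : List Int) (hA : InRangeAll A) (j : Nat) (hj : 1 ≤ j)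
    (v2 : List Int) (hv2len : v2.length = A.length)
    (hv2 : ∀ m, m < A.length → v2.getD m 0 = T A j m)
    (i : Nat) (hi : i + 1 < A.length)
    (t : List Int × List Int) (h : Inv2 A j (i+1) t) :
    Inv2 A j 0 ((PySem.List.pyRange (i : Int) (-1) (-1)).foldl (aStep2 A v2) t) := by
  induction i generalizing t with
  | zero =>
    rw [PySem.List.pyRange_neg_one_cons (by omega),
        PySem.List.pyRange_neg_one_eq_nil (by norm_num)]
    simpa using step2_spec A hA j hj v2 hv2len hv2 0 hi t h
  | succ i ih =>
    rw [PySem.List.pyRange_neg_one_cons (by omega)]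
    have h1 : ((i+1 : Nat) : Int) - 1 = (i : Int) := by push_cast; ring
    rw [List.foldl_cons, h1]
    exact ih (by omega) _ (step2_spec A hA j hj v2 hv2len hv2 (i+1) hi t h)

-- the copy loop v2[i] = v1[i] for i in range(len(v1))
lemma getD_replicate' {α : Type} (n m : Nat) (a d : α) (h : m < n) :
    (List.replicate n a).getD m d = a := by
  rw [List.getD_eq_getElem _ _ (by simpa using h)]; simp

lemma copy_spec (v1 : List Int) (d : Nat) :
    ∀ (v2 : List Int), v2.length = v1.length → d ≤ v1.length →
    (((PySem.List.pyRange ((v1.length - d : Nat) : Int) ((v1.length : Nat) : Int) 1).foldl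
        (fun w i => PySem.List.pySetD w i (PySem.List.pyGetD v1 i 0)) v2).length = v1.length ∧
     ∀ m, m < v1.length →
      ((PySem.List.pyRange ((v1.length - d : Nat) : Int) ((v1.length : Nat) : Int) 1).foldl
        (fun w i => PySem.List.pySetD w i (PySem.List.pyGetD v1 i 0)) v2).getD m 0 =
      if v1.length - d ≤ m then v1.getD m 0 else v2.getD m 0) := by
  induction d with
  | zero =>
    intro v2 hlen _
    rw [Nat.sub_zero, PySem.List.pyRange_one_eq_nil (by omega)]
    exact ⟨hlen, fun m hm => by rw [List.foldl_nil, if_neg (by omega)]⟩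
  | succ d ih =>
    intro v2 hlen hd
    rw [PySem.List.pyRange_one_cons (by omega), List.foldl_cons,
        show ((v1.length - (d+1) : Nat) : Int) + 1 = ((v1.length - d : Nat) : Int) by omega]
    have hsetlen : (PySem.List.pySetD v2 ((v1.length - (d+1) : Nat) : Int)
        (PySem.List.pyGetD v1 ((v1.length - (d+1) : Nat) : Int) 0)).length = v1.length := by
      simp [hlen]
    obtain ⟨ihl, ihv⟩ := ih _ hsetlen (by omega)
    refine ⟨ihl, ?_⟩
    intro m hm
    rw [ihv m hm]
    by_cases h1 : v1.length - d ≤ m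
    · rw [if_pos h1, if_pos (by omega)]
    · rw [if_neg h1]
      simp only [PySem.List.pySetD_natCast, PySem.List.pyGetD_natCast]
      by_cases h2 : v1.length - (d+1) ≤ m
      · rw [if_pos (by omega), show m = v1.length - (d+1) by omega,
            getD_set_eq _ _ _ _ (by rw [hlen]; omega)]
      · rw [if_neg (by omega), getD_set_ne _ _ _ _ _ (by omega)]

lemma copy_all (v1 : List Int) (v2 : List Int) (hlen : v2.length = v1.length) :
    (((PySem.List.pyRange 0 ((v1.length : Nat) : Int) 1).foldl
        (fun w i => PySem.List.pySetD w i (PySem.List.pyGetD v1 i 0)) v2).length = v1.length ∧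
     ∀ m, m < v1.length →
      ((PySem.List.pyRange 0 ((v1.length : Nat) : Int) 1).foldl
        (fun w i => PySem.List.pySetD w i (PySem.List.pyGetD v1 i 0)) v2).getD m 0 = v1.getD m 0) := by
  have h := copy_spec v1 v1.length v2 hlen (le_refl _)
  rw [Nat.sub_self] at h
  obtain ⟨h1, h2⟩ := h
  rw [show ((0:Nat):Int) = (0:Int) by norm_num] at h1 h2
  exact ⟨h1, fun m hm => by rw [h2 m hm, if_pos (by omega)]⟩

lemma layer_spec (A : List Int) (hA : InRangeAll A) (n : Nat) (hn : n = A.length)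
    (hn2 : 2 ≤ A.length) (j : Nat) (hj : 1 ≤ j) (jj : Int) (s : List Int × List Int)
    (hlen1 : s.1.length = A.length) (hlen2 : s.2.length = A.length)
    (hv2 : ∀ m, m < A.length → s.2.getD m 0 = T A j m) :
    (aLayer A n (A.length : Int) s jj).1.length = A.length ∧
    (aLayer A n (A.length : Int) s jj).2.length = A.length ∧
    (∀ m, m < A.length → (aLayer A n (A.length 
: Int) s jj).2.getD m 0 = T A (j+1) m) := by
  unfold aLayer
  rw [show (A.length : Int) - 1 = ((A.length - 1 : Nat) : Int) by omega,
      show (A.length : Int) - 2 = ((A.length - 2 : Nat) : Int) by omega]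
  have hInit : Inv2 A j ((A.length - 2) + 1)
      (PySem.List.pySetD s.1 ((A.length - 1 : Nat) : Int) 0, List.replicate n (0:Int)) := by
    rw [show A.length - 2 + 1 = A.length - 1 by omega]
    refine ⟨by simp [hlen1], by simp [hn], ?_, ?_⟩
    · intro m him hmn
      rw [show m = A.length - 1 by omega]
      simp only [PySem.List.pySetD_natCast]
      rw [getD_set_eq _ _ _ _ (by rw [hlen1]; omega)]
      have hr := T_rec A j (A.length - 1) (by omega)
      rw [occ_of_ge _ _ _ _ (by omega), show A.length - 1 + 1 = A.length by omega,
          T_top A (j+1) (by omega) _ (le_refl _), T_top A j hj _ (le_refl _)] at hr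
      rw [hr]
      show (0:Int) = 0 + 0 - 0
      norm_num
    · intro p hp
      rw [occ_of_ge _ _ _ _ (by omega), getD_replicate' _ _ _ _ (by omega)]
  have hLoop := loop2_spec A hA j hj s.2 hlen2 hv2 (A.length - 2) (by omega) _ hInit
  obtain ⟨hL1, hL2, hLV, _⟩ := hLoop
  have hcopy := copy_all
      ((PySem.List.pyRange ((A.length - 2 : Nat) : Int) (-1) (-1)).foldl (aStep2 A s.2)
        (PySem.List.pySetD s.1 ((A.length - 1 : Nat) : Int) 0, List.replicate n (0:Int))).1
      s.2 (by rw [hlen2, hL1])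
  rw [hL1] at hcopy
  obtain ⟨hc1, hc2⟩ := hcopy
  simp only [PySem.List.len_eq]
  rw [hL1]
  exact ⟨rfl, hc1, fun m hm => by rw [hc2 m hm, hLV m (by omega) hm]⟩

lemma outer_spec (A : List Int) (hA : InRangeAll A) (n : Nat) (hn : n = A.length)
    (hn2 : 2 ≤ A.length) (k : Int) (hk : k < A.length) (d : Nat) :
    ∀ (j : Nat), 1 ≤ j → (j : Int) + (d : Int) = k →
    ∀ (s : List Int × List Int), s.1.length = A.length → s.2.length = A.length →
    (∀ m, m < A.length → s.2.getD m 0 = T A j m) →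
    ∀ m, m < A.length →
      ((PySem.List.pyRange (j : Int) k 1).foldl (aLayer A n (A.length : Int)) s).2.getD m 0 =
        T A k.toNat m := by
  induction d with
  | zero =>
    intro j hj hjk s h1 h2 hv m hm
    rw [PySem.List.pyRange_one_eq_nil (by omega), List.foldl_nil,
        show k.toNat = j by omega]
    exact hv m hm
  | succ d ih =>
    intro j hj hjk s h1 h2 hv m hm
    rw [PySem.List.pyRange_one_cons (by omega), List.foldl_cons,
        show ((j:Int)) + 1 = ((j+1 : Nat) : Int) by omega]
    obtain ⟨g1, g2, g3⟩ := layer_spec A hA n hn hn2 j hj (j:Int) s h1 h2 hv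
    exact ih (j+1) (by omega) (by push_cast at hjk ⊢; omega) _ g1 g2 g3 m hm

-- ## B-side invariants
def InvRow (A : List Int) (k : Nat) (i : Nat) (p : Nat) (row : List Int) : Prop :=
  row.length = k ∧ ∀ q, q < k →
    row.getD q 0 = match occ A A.length p i with | some m => T A q (m+1) | none => 0

def InvB (A : List Int) (k : Nat) (i : Nat) (s : List Int × List (List Int)) : Prop :=
  s.1.length = k + 1 ∧ s.2.length = A.length ∧
  (∀ j, j ≤ k → s.1.getD j 0 = T A j i) ∧
  (∀ p, p < A.length → InvRow A k i p (s.2.getD p []))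

def InvBI (A : List Int) (k : Nat) (i : Nat) (j0 : Nat) (t : List Int × List Int) : Prop :=
  t.1.length = k + 1 ∧ t.2.length = k ∧
  (∀ j, j ≤ j0 → t.1.getD j 0 = T A j (i+1)) ∧
  (∀ j, j0 < j → j ≤ k → t.1.getD j 0 = T A j i) ∧
  (∀ q, q < j0 →
    t.2.getD q 0 = match occ A A.length (keyOf A i) (i+1) with | some m => T A q (m+1) | none => 0) ∧
  (∀ q, j0 ≤ q → q < k → t.2.getD q 0 = T A q (i+1))

lemma bInner_spec (A : List Int) (k : Nat) (i : Nat) (hi : i < A.length)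
    (j0 : Nat) (hj0 : 1 ≤ j0) (hj0k : j0 ≤ k)
    (t : List Int × List Int) (h : InvBI A k i j0 t) :
    InvBI A k i (j0 - 1) (bInner t (j0 : Int)) := by
  obtain ⟨hl1, hl2, hle, hgt, hold, hnew⟩ := h
  unfold bInner
  simp only [show ((j0:Int)) - 1 = ((j0-1 : Nat) : Int) by omega,
    PySem.List.pySetD_natCast, PySem.List.pyGetD_natCast]
  refine ⟨by simp [hl1], by simp [hl2], ?_, ?_, ?_, ?_⟩
  · intro j hj
    rw [getD_set_ne _ _ _ _ _ (by omega)]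
    exact hle j (by omega)
  · intro j hjgt hjk
    by_cases hjj : j = j0
    · rw [hjj]
      rw [getD_set_eq _ _ _ _ (by rw [hl1]; omega),
          hle j0 (le_refl _), hle (j0-1) (by omega), hold (j0-1) (by omega)]
      have hr := T_rec A (j0-1) i hi
      rw [show j0 - 1 + 1 = j0 by omega] at hr
      rw [hr]
    · rw [getD_set_ne _ _ _ _ _ (by omega)]
      exact hgt j (by omega) hjk
  · intro q hq
    rw [getD_set_ne _ _ _ _ _ (by omega)]
    exact hold q (by omega)
  · intro q hq1 hq2
    by_cases hqq : q = j0 - 1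
    · subst hqq
      rw [getD_set_eq _ _ _ _ (by rw [hl2]; omega)]
      exact hle (j0-1) (by omega)
    · rw [getD_set_ne _ _ _ _ _ (by omega)]
      exact hnew q (by omega) hq2

lemma bInnerLoop_spec (A : List Int) (k : Nat) (i : Nat) (hi : i < A.length)
    (j0 : Nat) (hj0k : j0 ≤ k)
    (t : List Int × List Int) (h : InvBI A k i j0 t) :
    InvBI A k i 0 ((PySem.List.pyRange (j0 : Int) 0 (-1)).foldl bInner t) := by
  induction j0 generalizing t with
  | zero => rw [PySem.List.pyRange_neg_one_eq_nil (by omega)]; exact h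
  | succ j0 ih =>
    rw [PySem.List.pyRange_neg_one_cons (by omega)]
    have h1 : ((j0+1 : Nat) : Int) - 1 = (j0 : Int) := by push_cast; ring
    rw [List.foldl_cons, h1]
    have := bInner_spec A k i hi (j0+1) (by omega) hj0k t h
    simp only [Nat.add_sub_cancel] at this
    exact ih (by omega) _ this

lemma bStep_spec (A : List Int) (hA : InRangeAll A) (k : Nat) (hk : 1 ≤ k)
    (i : Nat) (hi : i < A.length)
    (s : List Int × List (List Int)) (h : InvB A k (i+1) s) :
    InvB A k i (bStep (k : Int) s (aGet A i)) := by
  obtain ⟨hl1, hl2, hdp, hrows⟩ := h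
  have hmem : aGet A i ∈ A := by
    unfold aGet; rw [List.getD_eq_getElem _ _ hi]; exact List.getElem_mem hi
  have hside := hA _ hmem
  have hkey : keyOf A i < A.length := keyOf_lt A hA i hi
  have ekey : normI s.2.length (aGet A i - 1) = keyOf A i := by rw [hl2]; rfl
  have e3 : PySem.List.pyGetD s.2 (aGet A i - 1) [] = s.2.getD (keyOf A i) [] := by
    rw [pyGetD_inrange _ _ _ (by rw [hl2]; omega) (by rw [hl2]; omega), ekey]
  obtain ⟨hrowlen, hrowval⟩ := hrows _ hkey
  have hstart : InvBI A k i k (s.1, s.2.getD (keyOf A i) []) := by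
    refine ⟨hl1, hrowlen, fun j hj => hdp j hj, ?_, fun q hq => hrowval q (by omega), ?_⟩
    · intro j h1 h2; exact absurd h1 (by omega)
    · intro q h1 h2; exact absurd h2 (by omega)
  have hloop := bInnerLoop_spec A k i hi k (le_refl _) _ hstart
  obtain ⟨gl1, gl2, gle, ggt, _gold, gnew⟩ := hloop
  have hoccp : occ A A.length (keyOf A i) i = some i := by
    rw [occ_of_lt _ _ _ _ hi, if_pos rfl]
  unfold bStep
  simp only [e3]
  rw [pySetD_inrange _ _ _ (by rw [hl2]; omega) (by rw [hl2]; omega), ekey]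
  refine ⟨gl1, by simp [hl2], ?_, ?_⟩
  · intro j hj
    rcases Nat.eq_zero_or_pos j with rfl | hjpos
    · rw [gle 0 (le_refl _), T_zero, T_zero]
    · exact ggt j hjpos hj
  · intro p hp
    by_cases hpk : keyOf A i = p
    · subst hpk
      rw [getD_set_eq _ _ _ _ (by rw [hl2]; omega)]
      exact ⟨gl2, fun q hq => by rw [gnew q (by omega) hq, hoccp]⟩
    · rw [getD_set_ne _ _ _ _ _ hpk]
      obtain ⟨rl, rv⟩ := hrows p hp
      exact ⟨rl, fun q hq => by
        rw [rv q hq, occ_of_lt A _ p i hi, if_neg hpk]⟩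

lemma bLoop_spec (A : List Int) (hA : InRangeAll A) (k : Nat) (hk : 1 ≤ k) :
    ∀ (i : Nat), i ≤ A.length → ∀ (s : List Int × List (List Int)), InvB A k i s →
    InvB A k 0 (((A.take i).reverse).foldl (bStep (k : Int)) s) := by
  intro i
  induction i with
  | zero => intro _ s h; simpa using h
  | succ i ih =>
    intro hi s h
    have htake : A.take (i+1) = A.take i ++ [A[i]'(by omega)] := by
      rw [List.take_succ, List.getElem?_eq_getElem (by omega)]; rfl
    rw [htake, List.reverse_append]
    simp only [List.reverse_singleton, List.singleton_append, List.foldl_cons]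
    have hget : A[i]'(by omega) = aGet A i := by
      unfold aGet; rw [List.getD_eq_getElem _ _ (by omega)]
    rw [hget]
    exact ih (by omega) _ (bStep_spec A hA k hk i (by omega) s h)

-- ===== main characterisations =====
lemma solutionA_eq_T (A : List Int) (k : Int) (hA : InRangeAll A)
    (hk1 : 1 ≤ k) (hkn : k < (A.length : Int)) :
    solution A k = T A k.toNat 0 := by
  have hn2 : 2 ≤ A.length := by omega
  simp only [solution, PySem.List.len_eq]
  rw [if_neg (by omega), if_neg (by omega),
      show (A.length : Int) - 1 = ((A.length - 1 : Nat) : Int) by omega,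
      show (A.length : Int) - 2 = ((A.length - 2 : Nat) : Int) by omega]
  have hgA : PySem.List.pyGetD A ((A.length - 1 : Nat) : Int) 0 = aGet A (A.length - 1) := by
    simp [aGet]
  rw [hgA]
  have hmem : aGet A (A.length - 1) ∈ A := by
    unfold aGet; rw [List.getD_eq_getElem _ _ (by omega)]; exact List.getElem_mem (by omega)
  have hside := hA _ hmem
  have hkey : keyOf A (A.length - 1) < A.length := keyOf_lt A hA _ (by omega)
  have hInit : Inv1 A ((A.length - 2) + 1)
      (PySem.List.pySetD (List.replicate A.length (0:Int)) ((A.length - 1 : Nat) : Int) 1,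
       PySem.List.pySetD (List.replicate A.length (0:Int)) (aGet A (A.length - 1) - 1) 1) := by
    rw [show A.length - 2 + 1 = A.length - 1 by omega]
    have ekey : normI (List.replicate A.length (0:Int)).length (aGet A (A.length - 1) - 1)
        = keyOf A (A.length - 1) := by rw [List.length_replicate]; rfl
    rw [pySetD_inrange (List.replicate A.length (0:Int)) (aGet A (A.length - 1) - 1) 1
          (by simp; omega) (by simp; omega), ekey]
    refine ⟨by simp, by simp, ?_, ?_⟩
    · intro m him hmn
      rw [show m = A.length - 1 by omega]
      simp only [PySem.List.pySetD_natCast]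
      rw [getD_set_eq _ _ _ _ (by simp; omega)]
      have hr := T_rec A 0 (A.length - 1) (by omega)
      rw [occ_of_ge _ _ _ _ (by omega), show A.length - 1 + 1 = A.length by omega,
          T_top A 1 (by omega) _ (le_refl _), T_zero] at hr
      rw [hr]
      show (1:Int) = 0 + 1 - 0
      norm_num
    · intro p hp
      by_cases hpk : keyOf A (A.length - 1) = p
      · subst hpk
        rw [getD_set_eq _ _ _ _ (by simp; omega),
            occ_of_lt _ _ _ _ (by omega), if_pos rfl]
      · rw [getD_set_ne _ _ _ _ _ hpk,
            occ_of_lt A _ p (A.length - 1) (by omega), if_neg hpk,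
            occ_of_ge _ _ _ _ (by omega), getD_replicate' _ _ _ _ (by omega)]
  have hs := loop1_spec A hA (A.length - 2) (by omega) _ hInit
  obtain ⟨hs1, hs2, hsv, _⟩ := hs
  have houter := outer_spec A hA A.length rfl hn2 k hkn (k-1).toNat 1 (le_refl _)
      (by omega)
      (List.replicate A.length 0,
       ((PySem.List.pyRange ((A.length - 2 : Nat) : Int) (-1) (-1)).foldl (aStep1 A)
        (PySem.List.pySetD (List.replicate A.length (0:Int)) ((A.length - 1 : Nat) : Int) 1,
         PySem.List.pySetD (List.replicate A.length (0:Int)) (aGet A (A.length - 1) - 1) 1)).1)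
      (by simp) hs1 (fun m hm => hsv m (by omega) hm) 0 (by omega)
  rw [show ((1:Nat):Int) = (1:Int) by norm_num] at houter
  rw [PySem.List.pyGetD_zero]
  exact houter

lemma solutionB_eq_T (A : List Int) (k : Int) (hA : InRangeAll A)
    (hk1 : 1 ≤ k) (hkn : k < (A.length : Int)) :
    solution_alt A k = T A k.toNat 0 := by
  have hn2 : 2 ≤ A.length := by omega
  simp only [solution_alt, PySem.List.len_eq]
  rw [if_neg (by omega), if_neg (by omega)]
  have hInit : InvB A k.toNat A.length
      (1 :: List.replicate k.toNat 0, List.replicate A.length (List.replicate k.toNat 0)) := by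
    refine ⟨by simp, by simp, ?_, ?_⟩
    · intro j hj
      cases j with
      | zero => rw [List.getD_cons_zero, T_zero]
      | succ q =>
        rw [List.getD_cons_succ, getD_replicate' _ _ _ _ (by omega),
            T_top A (q+1) (by omega) _ (le_refl _)]
    · intro p hp
      rw [getD_replicate' _ _ _ _ (by omega)]
      refine ⟨by simp, ?_⟩
      intro q hq
      rw [occ_of_ge _ _ _ _ (le_refl _), getD_replicate' _ _ _ _ (by omega)]
  have hB := bLoop_spec A hA k.toNat (by omega) A.length (le_refl _) _ hInit
  rw [List.take_length] at hB
  obtain ⟨hb1, _, hbv, _⟩ := hB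
  rw [show k = ((k.toNat : Nat) : Int) by omega] at *
  rw [PySem.List.pyGetD_natCast]
  exact hbv k.toNat (le_refl _)

-- ===== VERDICT (by name: the statement is the Claim_ definition above) =====
theorem solution_spec : Claim_equal_solution := by
  intro A k _hdom hpre
  unfold Spec_solution
  by_cases hbase : (PySem.List.len A) < k ∨ (PySem.List.len A) < 1 ∨ k < 1
  · unfold solution solution_alt; simp only [if_pos hbase]
  · by_cases heq : (PySem.List.len A) = k
    · unfold solution solution_alt; simp only [if_neg hbase, if_pos heq]
    · have hlen : PySem.List.len A = (A.length : Int) := by simp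
      rw [hlen] at hbase heq
      have hk1 : 1 ≤ k := by omega
      have hkn : k < (A.length : Int) := by omega
      have hA : InRangeAll A := by
        unfold Pre_solution at hpre
        rcases hpre with h | h | h
        · omega
        · omega
        · exact h
      rw [solutionA_eq_T A k hA hk1 hkn, solutionB_eq_T A k hA hk1 hkn]
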